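-- pv_equiv track=rewrite | github.com/AmirAsgary/TCRtyper | dev_test_scripts/dataset_processing/assemble_train_dataset.py | build_hla_id_mappings
-- ===== SOURCE A (Python) =====
-- from typing import Dict, Iterable, List, Mapping, Sequence, Tuple
--
-- def classify_hla(a: str) -> str:
--     u = a.upper()
--     if u.startswith(("HLA-A", "HLA-B", "HLA-C")):
--         return "I"
--     if u.startswith(("HLA-DP", "HLA-DQ", "HLA-DR")):
--         return "II"
--     return "OTHER"
--
-- def build_hla_id_mappings(
--     freq: Mapping[str, int],
-- ) -> Tuple[Dict[str, int], Dict[str, str]]: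
--     mhc_i = sorted(
--         [(a, c) for a, c in freq.items() if classify_hla(a) == "I"],
--         key=lambda t: (-t[1], t[0]),
--     )
--     mhc_ii = sorted(
--         [(a, c) for a, c in freq.items() if classify_hla(a) == "II"],
--         key=lambda t: (-t[1], t[0]),
--     )
--     ordered = [a for a, _ in mhc_i] + [a for a, _ in mhc_ii]
--     hla_to_id = {a: i for i, a in enumerate(ordered)}
--     id_to_hla = {str(i): a for a, i in hla_to_id.items()}
--     return hla_to_id, id_to_hla
-- ===== SOURCE B (Python) =====
-- def build_hla_id_mappings(freq):
--     # Incremental order maintenance: one pass over freq inserts each class-I/II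
--     # allele into its place in an already-ordered list (no sorted() call),
--     # then one enumerate loop fills both dicts.
--     mhc_i = []
--     mhc_ii = []
--     for a, c in freq.items():
--         u = a.upper()
--         if u.startswith(("HLA-A", "HLA-B", "HLA-C")):
--             lst = mhc_i
--         elif u.startswith(("HLA-DP", "HLA-DQ", "HLA-DR")):
--             lst = mhc_ii
--         else:
--             continue
--         pos = 0
--         while pos < len(lst) and (-lst[pos][1], lst[pos][0]) < (-c, a):
--             pos += 1
--         lst.insert(pos, (a, c))
--     hla_to_id = {}
--     id_to_hla = {}
--     i = 0
--     for a, _ in mhc_i + mhc_ii: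
--         hla_to_id[a] = i
--         id_to_hla[str(i)] = a
--         i += 1
--     return hla_to_id, id_to_hla
-- ===== Notes on version B (the rewrite author's own statement) =====
-- stated objective: alternative
-- what changed: A batch-sorts: it filters class I and class II separately, calls sorted() on each, concatenates, and builds the two dicts by two comprehensions; B never calls sorted(): a single pass over freq inserts each class-I/II allele into its position in an incrementally maintained ordered list (order maintenance by positional insertion), then one enumerate loop fills both dicts together.
import Mathlib
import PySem

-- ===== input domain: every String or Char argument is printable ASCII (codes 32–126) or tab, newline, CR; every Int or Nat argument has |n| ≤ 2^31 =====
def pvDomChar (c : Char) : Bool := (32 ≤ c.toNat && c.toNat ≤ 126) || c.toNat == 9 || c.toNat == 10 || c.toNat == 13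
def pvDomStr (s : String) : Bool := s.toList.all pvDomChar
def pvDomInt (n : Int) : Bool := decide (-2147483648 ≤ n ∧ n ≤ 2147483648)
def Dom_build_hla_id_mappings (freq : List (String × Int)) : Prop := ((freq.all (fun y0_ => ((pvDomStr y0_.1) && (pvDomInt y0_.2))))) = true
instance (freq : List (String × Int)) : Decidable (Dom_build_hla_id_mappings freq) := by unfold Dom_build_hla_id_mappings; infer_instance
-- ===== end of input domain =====

-- B replaces A's batch sorts (two filter-then-sorted() passes plus two dict comprehensions) by
-- incremental order maintenance: a single pass over freq inserts each class-I/II allele into its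
-- place in an already-ordered list, then one enumerate loop fills both dicts (alternative algorithm).

-- ===== PORT A =====
def classify_hla (a : String) : String :=
  let u := PySem.Str.upper a
  if PySem.Str.startswith u "HLA-A" || PySem.Str.startswith u "HLA-B" || PySem.Str.startswith u "HLA-C" then "I"
  else if PySem.Str.startswith u "HLA-DP" || PySem.Str.startswith u "HLA-DQ" || PySem.Str.startswith u "HLA-DR" then "II"
  else "OTHER"

-- the Python tuple key (-t[1], t[0]) is ported as the lexicographic pair Lex (Int × String)
-- (exact: Python compares tuples lexicographically, and Python's str '<' is Lean's String '<')
def build_hla_id_mappings (freq : List (String × Int)) : (List (String × Int)) × (List (String × String)) :=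
  let mhc_i := PySem.List.sorted (freq.filter (fun t => classify_hla t.1 == "I")) (fun t => toLex (-t.2, t.1))
  let mhc_ii := PySem.List.sorted (freq.filter (fun t => classify_hla t.1 == "II")) (fun t => toLex (-t.2, t.1))
  let ordered := mhc_i.map (fun t => t.1) ++ mhc_ii.map (fun t => t.1)
  let hla_to_id : PySem.Dict String Int :=
    (PySem.List.enumerate ordered).foldl (fun d p => d.insert p.2 p.1) PySem.Dict.empty
  let id_to_hla : PySem.Dict String String :=
    hla_to_id.items.foldl (fun d p => d.insert (PySem.Int.toStr p.2) p.1) PySem.Dict.empty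
  (hla_to_id.items, id_to_hla.items)

-- ===== PORT B =====
-- the while-loop position scan followed by list.insert(pos, (a, c)): walk past the entries whose
-- key (-count, name) is strictly smaller, place the new entry there
def insEntry (x : String × Int) : List (String × Int) → List (String × Int)
  | [] => [x]
  | p :: rest =>
    if (toLex (-p.2, p.1) : Lex (Int × String)) < toLex (-x.2, x.1) then p :: insEntry x rest
    else x :: p :: rest

-- the body of B's first loop: dispatch the item into the class-I or class-II ordered list
def bStep (s : List (String × Int) × List (String × Int)) (t : String × Int) :
    List (String × Int) × List (String × Int) :=
  let u := PySem.Str.upper t.1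
  if PySem.Str.startswith u "HLA-A" || PySem.Str.startswith u "HLA-B" || PySem.Str.startswith u "HLA-C" then
    (insEntry t s.1, s.2)
  else if PySem.Str.startswith u "HLA-DP" || PySem.Str.startswith u "HLA-DQ" || PySem.Str.startswith u "HLA-DR" then
    (s.1, insEntry t s.2)
  else s

def build_hla_id_mappings_alt (freq : List (String × Int)) : (List (String × Int)) × (List (String × String)) :=
  let st := freq.foldl bStep ([], [])
  let pr : PySem.Dict String Int × PySem.Dict String String :=
    (PySem.List.enumerate ((st.1 ++ st.2).map (fun t => t.1))).foldl
      (fun pr p => (pr.1.insert p.2 p.1, pr.2.insert (PySem.Int.toStr p.1) p.2))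
      (PySem.Dict.empty, PySem.Dict.empty)
  (pr.1.items, pr.2.items)

-- ===== PRECONDITION & SPEC =====
-- Pre_ excludes association lists with duplicate keys: A's argument is a Python dict, which cannot
-- contain the same key twice, so such lists are ambiguous encodings of a dict, not inputs A ever sees.
def Pre_build_hla_id_mappings (freq : List (String × Int)) : Prop := (freq.map Prod.fst).Nodup
instance (freq : List (String × Int)) : Decidable (Pre_build_hla_id_mappings freq) := by unfold Pre_build_hla_id_mappings; infer_instance
def pvWitness_build_hla_id_mappings : (List (String × Int)) := [("HLA-A*01", 5), ("HLA-DRB1", 3)]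

def Spec_build_hla_id_mappings (freq : List (String × Int)) (out : (List (String × Int)) × (List (String × String))) : Prop := out = build_hla_id_mappings_alt freq
instance (freq : List (String × Int)) (out : (List (String × Int)) × (List (String × String))) : Decidable (Spec_build_hla_id_mappings freq out) := by unfold Spec_build_hla_id_mappings; infer_instance

-- ===== CLAIM (what is proved, stated in full; the proofs are below) =====
def Claim_equal_build_hla_id_mappings : Prop := ∀ (freq : List (String × Int)), Dom_build_hla_id_mappings freq → Pre_build_hla_id_mappings freq → Spec_build_hla_id_mappings freq (build_hla_id_mappings freq)

-- ===== LEMMAS AND PROOFS =====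

-- abbreviation used only in the proofs: the sort key both programs compare by
def keyOf (t : String × Int) : Lex (Int × String) := toLex (-t.2, t.1)

lemma insEntry_perm (x : String × Int) (l : List (String × Int)) :
    (insEntry x l).Perm (x :: l) := by
  induction l with
  | nil => simp [insEntry]
  | cons p rest ih =>
    unfold insEntry
    split_ifs with h
    · exact (ih.cons p).trans (List.Perm.swap x p rest)
    · exact List.Perm.refl _

lemma mem_insEntry {y x : String × Int} {l : List (String × Int)} (h : y ∈ insEntry x l) :
    y = x ∨ y ∈ l := by
  have := (insEntry_perm x l).subset h
  simpa using this

lemma insEntry_pairwise (x : String × Int) (l : List (String × Int))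
    (hp : l.Pairwise (fun a b => keyOf a < keyOf b))
    (hne : ∀ p ∈ l, keyOf p ≠ keyOf x) :
    (insEntry x l).Pairwise (fun a b => keyOf a < keyOf b) := by
  induction l with
  | nil => simp [insEntry]
  | cons p rest ih =>
    rw [List.pairwise_cons] at hp
    unfold insEntry
    split_ifs with h
    · refine List.pairwise_cons.mpr ⟨?_, ih hp.2 (fun q hq => hne q (List.mem_cons_of_mem p hq))⟩
      intro y hy
      rcases mem_insEntry hy with rfl | hy
      · exact h
      · exact hp.1 y hy
    · have hxp : keyOf x < keyOf p :=
        lt_of_le_of_ne (not_lt.mp h) (fun he => hne p List.mem_cons_self he.symm)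
      refine List.pairwise_cons.mpr ⟨?_, List.pairwise_cons.mpr hp⟩
      intro y hy
      rcases List.mem_cons.mp hy with rfl | hy
      · exact hxp
      · exact hxp.trans (hp.1 y hy)

lemma keyOf_eq_iff {a b : String × Int} : keyOf a = keyOf b ↔ a = b := by
  constructor
  · intro h
    have h1 : -a.2 = -b.2 := congrArg (fun x : Lex (Int × String) => (ofLex x).1) h
    have h2 : a.1 = b.1 := congrArg (fun x : Lex (Int × String) => (ofLex x).2) h
    exact Prod.ext h2 (by omega)
  · rintro rfl; rfl

-- folding insEntry from an ordered accumulator with globally distinct names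
lemma fold_ins (l acc : List (String × Int))
    (hp : acc.Pairwise (fun a b => keyOf a < keyOf b))
    (hnd : ((acc ++ l).map Prod.fst).Nodup) :
    (l.foldl (fun a x => insEntry x a) acc).Perm (acc ++ l) ∧
    (l.foldl (fun a x => insEntry x a) acc).Pairwise (fun a b => keyOf a < keyOf b) := by
  induction l generalizing acc with
  | nil => exact ⟨by simp, hp⟩
  | cons x t ih =>
    have hxfresh : ∀ p ∈ acc, keyOf p ≠ keyOf x := by
      intro p hpmem he
      have hpx : p.1 = x.1 := congrArg Prod.fst (keyOf_eq_iff.mp he)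
      have heq : (acc ++ x :: t).map Prod.fst = acc.map Prod.fst ++ x.1 :: t.map Prod.fst := by simp
      rw [heq] at hnd
      have hdis := (List.nodup_append.mp hnd).2.2
      have h1 : p.1 ∈ acc.map Prod.fst := List.mem_map_of_mem hpmem
      exact hdis _ h1 _ (by simp) hpx
    have hp' := insEntry_pairwise x acc hp hxfresh
    have hperm : (insEntry x acc ++ t).Perm (acc ++ x :: t) := by
      refine ((insEntry_perm x acc).append_right t).trans ?_
      simpa using List.perm_middle.symm
    have hnd' : ((insEntry x acc ++ t).map Prod.fst).Nodup :=
      ((hperm.map Prod.fst).nodup_iff).mpr hnd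
    have := ih (insEntry x acc) hp' hnd'
    exact ⟨this.1.trans hperm, this.2⟩

-- B's dispatching loop body, rewritten through classify_hla
lemma bStep_classify (s : List (String × Int) × List (String × Int)) (t : String × Int) :
    bStep s t =
      if classify_hla t.1 == "I" then (insEntry t s.1, s.2)
      else if classify_hla t.1 == "II" then (s.1, insEntry t s.2)
      else s := by
  unfold bStep classify_hla
  dsimp only
  split_ifs <;> simp_all

-- B's single loop is the pair of the two per-class insertion folds
lemma fold_proj (l : List (String × Int)) (s : List (String × Int) × List (String × Int)) :
    l.foldl bStep s =
      ((l.filter (fun t => classify_hla t.1 == "I")).foldl (fun a x => insEntry x a) s.1,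
       (l.filter (fun t => classify_hla t.1 == "II")).foldl (fun a x => insEntry x a) s.2) := by
  induction l generalizing s with
  | nil => rfl
  | cons x t ih =>
    rw [List.foldl_cons, bStep_classify, List.filter_cons, List.filter_cons]
    by_cases h1 : classify_hla x.1 == "I"
    · have h2 : (classify_hla x.1 == "II") = false := by
        revert h1; unfold classify_hla; dsimp only; split_ifs <;> simp
      simp [h1, h2, ih]
    · by_cases h2 : classify_hla x.1 == "II"
      · simp [h1, h2, ih]
      · simp [h1, h2, ih]

-- two disjoint filters, concatenated, are a permutation of the filter of the disjunction
lemma filter_or_perm {α : Type} (p q : α → Bool) (h : ∀ x, ¬(p x = true ∧ q x = true)) (l : List α) :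
    (l.filter p ++ l.filter q).Perm (l.filter (fun x => p x || q x)) := by
  induction l with
  | nil => simp
  | cons a t ih =>
    by_cases hp : p a = true <;> by_cases hq : q a = true
    · exact absurd ⟨hp, hq⟩ (h a)
    · simpa [hp, hq] using ih.cons a
    · simp only [List.filter_cons, hp, hq, Bool.or_true, if_true, if_neg, Bool.false_eq_true,
        not_false_iff]
      exact List.perm_middle.trans (ih.cons a)
    · simpa [hp, hq] using ih

-- B's insertion fold over a filtered class IS A's stable sort of that class (distinct names)
lemma fold_ins_eq_sorted (r : String × Int → Bool) (freq : List (String × Int))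
    (hpre : (freq.map Prod.fst).Nodup) :
    PySem.List.sorted (freq.filter r) (fun t => toLex (-t.2, t.1))
      = (freq.filter r).foldl (fun a x => insEntry x a) [] := by
  have hnd : ((freq.filter r).map Prod.fst).Nodup :=
    hpre.sublist (List.filter_sublist.map Prod.fst)
  have h := fold_ins (freq.filter r) [] (by simp) (by simpa using hnd)
  apply PySem.List.sorted_eq_of_perm_of_pairwise_lt
  · simpa using h.1
  · exact h.2

-- B's single loop over (i, a) producing a pair of dicts is the pair of the two separate folds
lemma foldl_pair_dict (l : List (Int × String)) (b : PySem.Dict String Int) (c : PySem.Dict String String) :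
    l.foldl (fun pr p => (pr.1.insert p.2 p.1, pr.2.insert (PySem.Int.toStr p.1) p.2)) (b, c)
      = (l.foldl (fun d p => d.insert p.2 p.1) b, l.foldl (fun d p => d.insert (PySem.Int.toStr p.1) p.2) c) := by
  induction l generalizing b c with
  | nil => rfl
  | cons a t ih => exact ih _ _

-- the items of {a: i for i, a in enumerate(L)} for L without duplicates
set_option maxHeartbeats 2000000 in
lemma items_enum (L : List String) (hnd : L.Nodup) :
    (List.foldl (fun (d : PySem.Dict String Int) p => d.insert p.2 p.1) PySem.Dict.empty
        (PySem.List.enumerate L)).items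
      = (PySem.List.enumerate L).map (fun p => (p.2, p.1)) := by
  have h := PySem.Dict.items_foldl_insert_fresh (PySem.List.enumerate L) (fun p => p.2) (fun p => p.1)
      PySem.Dict.empty (fun a _ => PySem.Dict.contains_empty _)
      (by rw [PySem.List.map_snd_enumerate]; exact hnd)
  simpa using h

set_option maxHeartbeats 2000000 in
lemma build_eq_alt (freq : List (String × Int)) (hpre : (freq.map Prod.fst).Nodup) :
    build_hla_id_mappings freq = build_hla_id_mappings_alt freq := by
  unfold build_hla_id_mappings build_hla_id_mappings_alt
  dsimp only
  rw [fold_proj]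
  dsimp only
  rw [← fold_ins_eq_sorted _ _ hpre, ← fold_ins_eq_sorted _ _ hpre, foldl_pair_dict, ← List.map_append]
  have hLnd : (((PySem.List.sorted (freq.filter (fun t => classify_hla t.1 == "I"))
        (fun t => toLex (-t.2, t.1)))
      ++ (PySem.List.sorted (freq.filter (fun t => classify_hla t.1 == "II"))
        (fun t => toLex (-t.2, t.1)))).map (fun t => t.1)).Nodup := by
    have hdisj : ∀ x : String × Int,
        ¬((classify_hla x.1 == "I") = true ∧ (classify_hla x.1 == "II") = true) := by
      rintro x ⟨h1, h2⟩
      simp only [beq_iff_eq] at h1 h2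
      rw [h1] at h2
      exact absurd h2 (by decide)
    have hperm : (((PySem.List.sorted (freq.filter (fun t => classify_hla t.1 == "I"))
          (fun t => toLex (-t.2, t.1)))
        ++ (PySem.List.sorted (freq.filter (fun t => classify_hla t.1 == "II"))
          (fun t => toLex (-t.2, t.1)))).map (fun t : String × Int => t.1)).Perm
        ((freq.filter (fun x => (classify_hla x.1 == "I") || (classify_hla x.1 == "II"))).map (fun t : String × Int => t.1)) := by
      refine List.Perm.trans ?_ ((filter_or_perm _ _ hdisj freq).map (fun t : String × Int => t.1))
      exact (((PySem.List.sorted_perm _ _ false).append (PySem.List.sorted_perm _ _ false))).map _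
    refine hperm.symm.nodup ?_
    have hsub : ((freq.filter (fun x => (classify_hla x.1 == "I") || (classify_hla x.1 == "II"))).map
        (fun t : String × Int => t.1)).Sublist (freq.map Prod.fst) := by
      simpa using List.filter_sublist.map (fun t : String × Int => t.1)
    exact hpre.sublist hsub
  refine congrArg₂ Prod.mk rfl ?_
  rw [items_enum _ hLnd, List.foldl_map]

-- ===== VERDICT (by name: the statement is the Claim_ definition above) =====
theorem build_hla_id_mappings_spec : Claim_equal_build_hla_id_mappings := by
  intro freq _ hpre
  exact build_eq_alt freq hpre
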